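-- pv_equiv track=rewrite | github.com/Panda4817/advent-of-code-2022 | year2020/05/05.py | part1
-- ===== SOURCE A (Python) =====
-- def part1(data):
--   lst = data.split("\n")
--
--   highest = 0
--
--   for p in lst:
--     rows = []
--     for r in range(128):
--       rows.append(r)
--
--     columns = []
--     for c in range(8):
--       columns.append(c)
--
--     row = p[:7]
--     column = p[7:]
--
--     for r in row:
--       half = len(rows) // 2
--       if r == 'F': keep = rows[:half]
--       else: keep = rows[half:]
--       rows = keep
--
--     for c in column:
--       half = len(columns) // 2
--       if c == 'L': keep = columns[:half]
--       else: keep = columns[half:]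
--       columns = keep
--
--     id_num = (rows[0] * 8) + columns[0]
--     if id_num > highest: highest = id_num
--
--   return highest
-- ===== SOURCE B (Python) =====
-- def part1(data):
--     best = 0
--     for p in data.split("\n"):
--         lo, size = 0, 1024
--         for i, c in enumerate(p[:10]):
--             size //= 2
--             if c != ('F' if i < 7 else 'L'):
--                 lo += size
--         if lo > best:
--             best = lo
--     return best
-- ===== Notes on version B (the rewrite author's own statement) =====
-- stated objective: faster
-- what changed: B narrows a [lo, lo+size) seat-ID interval arithmetically (size halves each step; lo gains size on an upper-half letter) over at most 10 characters per line, instead of materialising 128-row and 8-column lists and repeatedly slicing them in half; Pre_ excludes only the inputs on which A raises IndexError (a lower-half column letter past the tenth position empties A's column list).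
import Mathlib
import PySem

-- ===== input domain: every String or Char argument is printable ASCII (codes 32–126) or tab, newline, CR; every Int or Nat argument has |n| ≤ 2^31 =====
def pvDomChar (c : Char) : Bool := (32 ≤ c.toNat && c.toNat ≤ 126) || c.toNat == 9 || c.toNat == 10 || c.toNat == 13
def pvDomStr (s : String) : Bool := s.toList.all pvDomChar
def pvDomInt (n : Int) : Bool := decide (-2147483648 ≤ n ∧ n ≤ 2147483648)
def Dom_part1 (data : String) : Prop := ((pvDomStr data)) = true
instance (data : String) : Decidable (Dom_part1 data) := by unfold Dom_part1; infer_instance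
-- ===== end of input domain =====

-- B narrows a [lo, lo+size) seat-ID interval arithmetically over at most 10 characters per line
-- instead of materialising 128-row and 8-column lists and repeatedly slicing them (objective: faster, constant factor).

-- ===== PORT A =====
def part1 (data : String) : Int :=
  ((PySem.Str.split? data "\n").getD []).foldl (fun highest p =>
    let rows : List Int := (PySem.List.pyRange 0 128).foldl (fun rows r => rows ++ [r]) []
    let columns : List Int := (PySem.List.pyRange 0 8).foldl (fun columns c => columns ++ [c]) []
    let row := PySem.Str.slice p none (some 7)
    let column := PySem.Str.slice p (some 7) none
    let rows := row.toList.foldl (fun rows r =>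
      let half := PySem.Int.floordiv (rows.length : Int) 2
      if r = 'F' then PySem.List.slice rows none (some half)
      else PySem.List.slice rows (some half) none) rows
    let columns := column.toList.foldl (fun columns c =>
      let half := PySem.Int.floordiv (columns.length : Int) 2
      if c = 'L' then PySem.List.slice columns none (some half)
      else PySem.List.slice columns (some half) none) columns
    -- rows[0] / columns[0]: IndexError = none is excluded by Pre_part1; .getD 0 is never used inside Pre_
    let id_num := (PySem.List.pyGet? rows 0).getD 0 * 8 + (PySem.List.pyGet? columns 0).getD 0
    if id_num > highest then id_num else highest) 0

-- ===== PORT B =====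
def part1_alt (data : String) : Int :=
  ((PySem.Str.split? data "\n").getD []).foldl (fun best p =>
    let ls := (PySem.List.enumerate (PySem.Str.slice p none (some 10)).toList 0).foldl
      (fun ls ic =>
        let size := PySem.Int.floordiv ls.2 2
        (if ic.2 ≠ (if ic.1 < 7 then 'F' else 'L') then ls.1 + size else ls.1, size))
      ((0 : Int), (1024 : Int))
    if ls.1 > best then ls.1 else best) 0

-- ===== PRECONDITION & SPEC =====
-- Pre_ excludes exactly the inputs on which A raises IndexError: a lower-half column letter
-- at an index ≥ 10 empties A's column list, so columns[0] fails.
def Pre_part1 (data : String) : Prop :=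
  ∀ p ∈ (PySem.Str.split? data "\n").getD [], ((p.toList.drop 10).all (fun c => !(c == 'L'))) = true
instance (data : String) : Decidable (Pre_part1 data) := by unfold Pre_part1; infer_instance
def pvWitness_part1 : String := "BL\nFR"

def Spec_part1 (data : String) (out : Int) : Prop := out = part1_alt data
instance (data : String) (out : Int) : Decidable (Spec_part1 data out) := by unfold Spec_part1; infer_instance

-- ===== CLAIM (what is proved, stated in full; the proofs are below) =====
def Claim_equal_part1 : Prop := ∀ (data : String), Dom_part1 data → Pre_part1 data → Spec_part1 data (part1 data)

-- ===== LEMMAS AND PROOFS =====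

-- A's per-line value (definitionally the body of part1's loop)
def pvAline (p : String) : Int :=
  let rows : List Int := (PySem.List.pyRange 0 128).foldl (fun rows r => rows ++ [r]) []
  let columns : List Int := (PySem.List.pyRange 0 8).foldl (fun columns c => columns ++ [c]) []
  let row := PySem.Str.slice p none (some 7)
  let column := PySem.Str.slice p (some 7) none
  let rows := row.toList.foldl (fun rows r =>
    let half := PySem.Int.floordiv (rows.length : Int) 2
    if r = 'F' then PySem.List.slice rows none (some half)
    else PySem.List.slice rows (some half) none) rows
  let columns := column.toList.foldl (fun columns c =>
    let half := PySem.Int.floordiv (columns.length : Int) 2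
    if c = 'L' then PySem.List.slice columns none (some half)
    else PySem.List.slice columns (some half) none) columns
  (PySem.List.pyGet? rows 0).getD 0 * 8 + (PySem.List.pyGet? columns 0).getD 0

-- B's per-line value (definitionally the body of part1_alt's loop)
def pvBline (p : String) : Int :=
  ((PySem.List.enumerate (PySem.Str.slice p none (some 10)).toList 0).foldl
    (fun ls ic =>
      let size := PySem.Int.floordiv ls.2 2
      (if ic.2 ≠ (if ic.1 < 7 then 'F' else 'L') then ls.1 + size else ls.1, size))
    ((0 : Int), (1024 : Int))).1

-- lower bound selected by A's halving loop from a block of size 2^k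
def pvAval (lowc : Char) : List Char → Nat → Int
  | [], _ => 0
  | c :: cs, k => (if c = lowc then 0 else 2 ^ (k - 1)) + pvAval lowc cs (k - 1)

-- Horner value of a character list, low character ↦ bit 0
def pvHval (lowc : Char) (cs : List Char) : Int :=
  cs.foldl (fun a c => a * 2 + (if c = lowc then 0 else 1)) 0

theorem pvHval_foldl (lowc : Char) (cs : List Char) (a : Int) :
    cs.foldl (fun a c => a * 2 + (if c = lowc then 0 else 1)) a
      = a * 2 ^ cs.length + pvHval lowc cs := by
  induction cs generalizing a with
  | nil => simp [pvHval]
  | cons c t ih =>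
    have h2 : pvHval lowc (c :: t) = (if c = lowc then 0 else 1) * 2 ^ t.length + pvHval lowc t := by
      simp only [pvHval, List.foldl_cons]
      rw [ih]; simp [pvHval]
    simp only [List.foldl_cons, List.length_cons]
    rw [ih, h2, pow_succ]; ring

theorem pvAval_eq (lowc : Char) (cs : List Char) (k : Nat) (h : cs.length ≤ k) :
    pvAval lowc cs k = pvHval lowc cs * 2 ^ (k - cs.length) := by
  induction cs generalizing k with
  | nil => simp [pvAval, pvHval]
  | cons c t ih =>
    cases k with
    | zero => simp at h
    | succ m =>
      have ht : t.length ≤ m := by simpa using h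
      have h2 : pvHval lowc (c :: t) = (if c = lowc then 0 else 1) * 2 ^ t.length + pvHval lowc t := by
        simp only [pvHval, List.foldl_cons]
        rw [pvHval_foldl]; simp [pvHval]
      have hpow : (2:Int) ^ t.length * 2 ^ (m - t.length) = 2 ^ m := by
        rw [← pow_add, Nat.add_sub_cancel' ht]
      simp only [pvAval, List.length_cons, Nat.succ_sub_succ, Nat.sub_zero]
      rw [ih m ht, h2]
      by_cases hc : c = lowc
      · simp [hc]
      · simp [hc]; rw [add_mul, hpow]

-- A's halving loop on a contiguous power-of-two range
theorem pvHalve_range (lowc : Char) (cs : List Char) (lo : Int) (k : Nat) (h : cs.length ≤ k) :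
    cs.foldl (fun xs c =>
      let half := PySem.Int.floordiv (xs.length : Int) 2
      if c = lowc then PySem.List.slice xs none (some half)
      else PySem.List.slice xs (some half) none) (PySem.List.pyRange lo (lo + 2 ^ k))
    = PySem.List.pyRange (lo + pvAval lowc cs k) (lo + pvAval lowc cs k + 2 ^ (k - cs.length)) := by
  induction cs generalizing lo k with
  | nil => simp [pvAval]
  | cons c t ih =>
    cases k with
    | zero => simp at h
    | succ m =>
      have ht : t.length ≤ m := by simpa using h
      have hlen : ((PySem.List.pyRange lo (lo + 2 ^ (m+1))).length : Int) = 2 ^ (m+1) := by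
        rw [PySem.List.length_pyRange_one]
        rw [show lo + 2 ^ (m+1) - lo = (2:Int) ^ (m+1) from by ring]
        rw [Int.toNat_of_nonneg (by positivity)]
      have hhalf : PySem.Int.floordiv ((PySem.List.pyRange lo (lo + 2 ^ (m+1))).length : Int) 2
          = 2 ^ m := by
        rw [hlen, PySem.Int.floordiv_eq_ediv_of_pos (by norm_num), pow_succ]
        exact Int.mul_ediv_cancel _ (by norm_num)
      have hsplit : PySem.List.pyRange lo (lo + 2 ^ (m+1))
          = PySem.List.pyRange lo (lo + 2 ^ m) ++ PySem.List.pyRange (lo + 2 ^ m) (lo + 2 ^ (m+1)) :=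
        PySem.List.pyRange_one_append _ _ _ (by
          have h0 : (0:Int) < 2 ^ m := by positivity
          omega) (by
          have : (2:Int) ^ m ≤ 2 ^ (m+1) := by
            apply pow_le_pow_right₀ <;> omega
          omega)
      have hlen1 : (PySem.List.pyRange lo (lo + 2 ^ m)).length = ((2:Int) ^ m).toNat := by
        rw [PySem.List.length_pyRange_one, show lo + 2 ^ m - lo = (2:Int) ^ m from by ring]
      simp only [List.foldl_cons, hhalf]
      by_cases hc : c = lowc
      · rw [if_pos hc, PySem.List.slice_to _ (show (0:Int) ≤ 2 ^ m by positivity), hsplit, List.take_left' hlen1,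
           ih lo m ht]
        simp [pvAval, hc, Nat.succ_sub_succ]
      · rw [if_neg hc, PySem.List.slice_from _ (show (0:Int) ≤ 2 ^ m by positivity), hsplit, List.drop_left' hlen1,
           show lo + 2 ^ (m+1) = (lo + 2 ^ m) + 2 ^ m from by ring, ih (lo + 2 ^ m) m ht]
        simp only [pvAval, if_neg hc, List.length_cons, Nat.succ_sub_succ, Nat.sub_zero]
        congr 1 <;> ring

-- extra column characters keep a singleton block unchanged when none is 'L'
theorem pvKeep_singleton (cs : List Char) (x : Int) (h : ∀ c ∈ cs, c ≠ 'L') :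
    cs.foldl (fun xs c =>
      let half := PySem.Int.floordiv (xs.length : Int) 2
      if c = 'L' then PySem.List.slice xs none (some half)
      else PySem.List.slice xs (some half) none) [x] = [x] := by
  induction cs with
  | nil => simp
  | cons c t ih =>
    have hc : c ≠ 'L' := h c (List.mem_cons_self)
    simp only [List.foldl_cons]
    rw [show PySem.Int.floordiv ((([x]:List Int).length : Int)) 2 = 0 from by
          rw [PySem.Int.floordiv_eq_ediv_of_pos (by norm_num)]; simp,
        if_neg hc, PySem.List.slice_from [x] (le_refl (0:Int))]
    rw [show List.drop (0:Int).toNat [x] = [x] from by simp]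
    exact ih (fun d hd => h d (List.mem_cons_of_mem _ hd))

-- B's interval fold, below the index-7 threshold ('F' side)
theorem pvBfold_F (cs : List Char) (s : Int) (lo : Int) (k : Nat)
    (hlen : cs.length ≤ k) (h7 : s + cs.length ≤ 7) :
    (PySem.List.enumerate cs s).foldl
      (fun ls ic =>
        let size := PySem.Int.floordiv ls.2 2
        (if ic.2 ≠ (if ic.1 < 7 then 'F' else 'L') then ls.1 + size else ls.1, size))
      (lo, 2 ^ k)
    = (lo + pvAval 'F' cs k, 2 ^ (k - cs.length)) := by
  induction cs generalizing s lo k with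
  | nil => simp [PySem.List.enumerate, pvAval]
  | cons c t ih =>
    cases k with
    | zero => simp at hlen
    | succ m =>
      have ht : t.length ≤ m := by simpa using hlen
      have hs : s < 7 := by simp at h7; omega
      have hhalf : PySem.Int.floordiv ((2:Int) ^ (m+1)) 2 = 2 ^ m := by
        rw [PySem.Int.floordiv_eq_ediv_of_pos (by norm_num), pow_succ]
        exact Int.mul_ediv_cancel _ (by norm_num)
      rw [PySem.List.enumerate_cons]
      simp only [List.foldl_cons, hhalf, if_pos hs]
      rw [ih (s+1) _ m ht (by simp at h7 ⊢; omega)]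
      simp only [pvAval, List.length_cons, Nat.succ_sub_succ, Nat.sub_zero]
      by_cases hc : c = 'F'
      · simp [hc]
      · simp [hc]; ring
  -- (the 'F' branch adds nothing; the other adds 2^m)

-- B's interval fold, at or above the index-7 threshold ('L' side)
theorem pvBfold_L (cs : List Char) (s : Int) (lo : Int) (k : Nat)
    (hlen : cs.length ≤ k) (h7 : 7 ≤ s) :
    (PySem.List.enumerate cs s).foldl
      (fun ls ic =>
        let size := PySem.Int.floordiv ls.2 2
        (if ic.2 ≠ (if ic.1 < 7 then 'F' else 'L') then ls.1 + size else ls.1, size))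
      (lo, 2 ^ k)
    = (lo + pvAval 'L' cs k, 2 ^ (k - cs.length)) := by
  induction cs generalizing s lo k with
  | nil => simp [PySem.List.enumerate, pvAval]
  | cons c t ih =>
    cases k with
    | zero => simp at hlen
    | succ m =>
      have ht : t.length ≤ m := by simpa using hlen
      have hs : ¬ (s < 7) := by omega
      have hhalf : PySem.Int.floordiv ((2:Int) ^ (m+1)) 2 = 2 ^ m := by
        rw [PySem.Int.floordiv_eq_ediv_of_pos (by norm_num), pow_succ]
        exact Int.mul_ediv_cancel _ (by norm_num)
      rw [PySem.List.enumerate_cons]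
      simp only [List.foldl_cons, hhalf, if_neg hs]
      rw [ih (s+1) _ m ht (by omega)]
      simp only [pvAval, List.length_cons, Nat.succ_sub_succ, Nat.sub_zero]
      by_cases hc : c = 'L'
      · simp [hc]
      · simp [hc]; ring

theorem pvLine_eq (p : String) (hp : ∀ c ∈ p.toList.drop 10, c ≠ 'L') : pvAline p = pvBline p := by
  unfold pvAline pvBline
  simp only [PySem.List.foldl_append_singleton, List.nil_append, PySem.Str.toList_slice,
    PySem.Chars.slice_eq_listSlice]
  rw [PySem.List.slice_to p.toList (show (0:Int) ≤ 7 by norm_num),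
      PySem.List.slice_from p.toList (show (0:Int) ≤ 7 by norm_num),
      PySem.List.slice_to p.toList (show (0:Int) ≤ 10 by norm_num)]
  simp only [Int.reduceToNat]
  rw [show (128:Int) = 0 + 2 ^ 7 from by norm_num, show (8:Int) = 0 + 2 ^ 3 from by norm_num]
  set r := p.toList.take 7 with hr
  set cc := (p.toList.drop 7).take 3 with hcc
  have hra : r.length = min 7 p.toList.length := by rw [hr, List.length_take]
  have hcb : cc.length = min 3 (p.toList.length - 7) := by
    rw [hcc, List.length_take, List.length_drop]
  rw [pvHalve_range 'F' r 0 7 (by omega),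
      ← List.take_append_drop 3 (p.toList.drop 7), List.foldl_append, ← hcc,
      pvHalve_range 'L' cc 0 3 (by omega)]
  rw [show (p.toList.drop 7).drop 3 = p.toList.drop 10 from by rw [List.drop_drop]]
  rw [show p.toList.take 10 = r ++ cc from by rw [hr, hcc, ← List.take_add]]
  rw [PySem.List.enumerate_append, List.foldl_append]
  rw [show ((1024:Int)) = 2 ^ 10 from by norm_num]
  rw [pvBfold_F r 0 0 10 (by omega) (by omega)]
  have hget : ∀ (a : Int) (e : Nat), (PySem.List.pyGet? (PySem.List.pyRange a (a + 2 ^ e)) 0).getD 0 = a := by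
    intro a e
    rw [PySem.List.pyRange_one_cons (by
          have h0 : (0:Int) < 2 ^ e := by positivity
          omega),
        PySem.List.pyGet?_zero_cons]
    rfl
  rw [hget]
  have hBF : (0:Int) + pvAval 'F' r 10 = pvAval 'F' r 7 * 8 := by
    rw [pvAval_eq 'F' r 10 (by omega), pvAval_eq 'F' r 7 (by omega),
        show (8:Int) = 2 ^ 3 from by norm_num, mul_assoc, ← pow_add,
        show 7 - r.length + 3 = 10 - r.length from by omega]
    ring
  by_cases h7 : 7 ≤ p.toList.length
  · have hra7 : r.length = 7 := by omega
    rw [show ((0:Int) + (r.length : Int)) = 7 from by rw [hra7]; norm_num,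
        show (10 - r.length) = 3 from by omega,
        pvBfold_L cc 7 _ 3 (by omega) (by norm_num)]
    by_cases hnil : p.toList.drop 10 = []
    · rw [hnil, List.foldl_nil, hget]
      simp only
      rw [hBF]; ring
    · have hb3 : cc.length = 3 := by
        have hlen10 : 11 ≤ p.toList.length := by
          by_contra hcon
          exact hnil (List.drop_eq_nil_of_le (by omega))
        omega
      rw [show (3 - cc.length) = 0 from by omega]
      rw [show (0 + pvAval 'L' cc 3 + 2 ^ 0) = (0 + pvAval 'L' cc 3) + 1 from by ring]
      rw [PySem.List.pyRange_one_singleton, pvKeep_singleton _ _ hp,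
          PySem.List.pyGet?_zero_cons]
      simp only [Option.getD_some]
      rw [hBF]; ring
  · have hd7 : p.toList.drop 7 = [] := List.drop_eq_nil_of_le (by omega)
    have hccnil : cc = [] := by rw [hcc, hd7]; simp
    rw [hccnil]
    have hd10 : p.toList.drop 10 = [] := List.drop_eq_nil_of_le (by omega)
    rw [hd10]
    simp only [List.foldl_nil, PySem.List.enumerate, List.foldl_nil]
    rw [hget]
    simp only [pvAval]
    rw [hBF]; ring

theorem pvFold_eq (lst : List String) (a : Int)
    (h : ∀ p ∈ lst, pvAline p = pvBline p) :
    lst.foldl (fun highest p => if pvAline p > highest then pvAline p else highest) a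
      = lst.foldl (fun best p => if pvBline p > best then pvBline p else best) a := by
  induction lst generalizing a with
  | nil => simp only [List.foldl_nil]
  | cons x t ih =>
    simp only [List.foldl_cons]
    rw [h x (List.mem_cons_self), ih _ (fun p hp => h p (List.mem_cons_of_mem _ hp))]

-- ===== VERDICT (by name: the statement is the Claim_ definition above) =====
theorem part1_spec : Claim_equal_part1 := by
  intro data _ hpre
  unfold Spec_part1 part1 part1_alt
  have : ∀ p ∈ (PySem.Str.split? data "\n").getD [], pvAline p = pvBline p := by
    intro p hp
    refine pvLine_eq p (fun c hc => ?_)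
    simpa using List.all_eq_true.mp (hpre p hp) c hc
  exact pvFold_eq _ 0 this
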